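-- pv_equiv track=rewrite | github.com/greggoren/auto_seo | CrossValidationUtils/data_preprocees_1m_track/filter_prels.py | get_needed_queries
-- ===== SOURCE A (Python) =====
-- def get_needed_queries(prels_stats):
--     queries=[]
--     for query in prels_stats:
--         relevant = [doc for doc in prels_stats[query] if prels_stats[query][doc]>0]
--         not_relevant = [doc for doc in prels_stats[query] if prels_stats[query][doc]==0]
--         if relevant and not_relevant:
--             queries.append(query)
--     return queries
-- ===== SOURCE B (Python) =====
-- def get_needed_queries(prels_stats):
--     needed = []
--     for query, stats in prels_stats.items():
--         has_pos = has_zero = False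
--         for v in stats.values():
--             if v > 0:
--                 has_pos = True
--             if v == 0:
--                 has_zero = True
--             if has_pos and has_zero:
--                 break
--         if has_pos and has_zero:
--             needed.append(query)
--     return needed
-- ===== Notes on version B (the rewrite author's own statement) =====
-- stated objective: simpler
-- what changed: Replaces the two per-query list comprehensions with their repeated dict lookups by a single early-exiting scan over the values maintaining two booleans; no intermediate lists are built.
import Mathlib
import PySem

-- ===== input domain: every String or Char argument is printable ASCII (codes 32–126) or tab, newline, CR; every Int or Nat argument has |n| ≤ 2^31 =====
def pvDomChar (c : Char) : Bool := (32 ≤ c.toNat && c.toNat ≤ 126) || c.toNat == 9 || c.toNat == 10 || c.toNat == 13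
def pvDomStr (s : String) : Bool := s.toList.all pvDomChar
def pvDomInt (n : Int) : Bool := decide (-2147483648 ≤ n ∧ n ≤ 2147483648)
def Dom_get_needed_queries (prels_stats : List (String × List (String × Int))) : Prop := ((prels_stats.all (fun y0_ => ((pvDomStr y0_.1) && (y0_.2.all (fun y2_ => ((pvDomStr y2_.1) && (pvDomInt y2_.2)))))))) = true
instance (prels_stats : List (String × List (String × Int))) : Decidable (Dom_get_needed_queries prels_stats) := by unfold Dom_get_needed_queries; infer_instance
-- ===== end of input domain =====

-- B replaces A's two per-query comprehensions (each with a dict lookup per doc) by one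
-- early-exiting boolean scan over the values; objective: simpler.

-- ===== PORT A =====
-- 'prels_stats[query]' / 'prels_stats[query][doc]': the key is always present in the Python
-- (it comes from iterating the same dict), so the Option lookup never yields none; getD is exact.
def get_needed_queries (prels_stats : List (String × List (String × Int))) : List String :=
  prels_stats.foldl (fun queries p =>
    let query := p.1
    let stats := ((PySem.Dict.mk prels_stats).get? query).getD []
    let relevant := (stats.map Prod.fst).filter
      (fun doc => decide (0 < ((PySem.Dict.mk stats).get? doc).getD 0))
    let not_relevant := (stats.map Prod.fst).filter
      (fun doc => decide (((PySem.Dict.mk stats).get? doc).getD 0 = 0))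
    if relevant ≠ [] ∧ not_relevant ≠ [] then queries ++ [query] else queries) []

-- ===== PORT B =====
-- the inner 'for v in stats.values()' loop with flags has_pos/has_zero and the early break
def pvHasBoth : List (String × Int) → Bool → Bool → Bool
  | [], has_pos, has_zero => has_pos && has_zero
  | (_, v) :: rest, has_pos, has_zero =>
    let has_pos := has_pos || decide (0 < v)
    let has_zero := has_zero || decide (v = 0)
    if has_pos && has_zero then true else pvHasBoth rest has_pos has_zero

def get_needed_queries_alt (prels_stats : List (String × List (String × Int))) : List String :=
  prels_stats.foldl (fun needed p =>
    if pvHasBoth p.2 false false then needed ++ [p.1] else needed) []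

-- ===== PRECONDITION & SPEC =====
-- Pre_ excludes association lists with duplicate query keys or duplicate doc keys inside a
-- query: those do not represent Python dicts (whose keys are unique), and there A's
-- first-match re-lookup vs B's use of each pair's own value is an artefact of the encoding.
def Pre_get_needed_queries (prels_stats : List (String × List (String × Int))) : Prop :=
  (prels_stats.map Prod.fst).Nodup ∧ ∀ p ∈ prels_stats, (p.2.map Prod.fst).Nodup
instance (prels_stats : List (String × List (String × Int))) : Decidable (Pre_get_needed_queries prels_stats) := by unfold Pre_get_needed_queries; infer_instance

def pvWitness_get_needed_queries : (List (String × List (String × Int))) :=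
  [("q1", [("d1", 1), ("d2", 0)]), ("q2", [("d3", -1)])]

def Spec_get_needed_queries (prels_stats : List (String × List (String × Int))) (out : List String) : Prop := out = get_needed_queries_alt prels_stats
instance (prels_stats : List (String × List (String × Int))) (out : List String) : Decidable (Spec_get_needed_queries prels_stats out) := by unfold Spec_get_needed_queries; infer_instance

-- ===== CLAIM (what is proved, stated in full; the proofs are below) =====
def Claim_equal_get_needed_queries : Prop := ∀ (prels_stats : List (String × List (String × Int))), Dom_get_needed_queries prels_stats → Pre_get_needed_queries prels_stats → Spec_get_needed_queries prels_stats (get_needed_queries prels_stats)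

-- ===== LEMMAS AND PROOFS =====

-- with unique keys, looking a key back up returns the pair's own value
theorem pv_mk_get?_of_mem {ν : Type} (ps : List (String × ν)) (q : String) (st : ν)
    (hnd : (ps.map Prod.fst).Nodup) (hmem : (q, st) ∈ ps) :
    (PySem.Dict.mk ps).get? q = some st := by
  induction ps with
  | nil => cases hmem
  | cons hd tl ih =>
    rw [List.map_cons, List.nodup_cons] at hnd
    rcases List.mem_cons.mp hmem with h | h
    · subst h
      simp [PySem.Dict.get?_mk_cons]
    · have hne : hd.1 ≠ q := by
        intro he; exact hnd.1 (he ▸ (List.mem_map.mpr ⟨(q, st), h, rfl⟩))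
      rw [PySem.Dict.get?_mk_cons]
      simp only [beq_iff_eq, if_neg hne]
      exact ih hnd.2 h

-- A's key-comprehension with re-lookup, under unique keys, is a filter on the pairs
theorem pv_keyfilter (P : Int → Bool) (st : List (String × Int))
    (hnd : (st.map Prod.fst).Nodup) :
    (st.map Prod.fst).filter (fun doc => P (((PySem.Dict.mk st).get? doc).getD 0))
      = (st.filter (fun p => P p.2)).map Prod.fst := by
  induction st with
  | nil => rfl
  | cons hd tl ih =>
    rw [List.map_cons, List.nodup_cons] at hnd
    have hlook : ∀ d ∈ tl.map Prod.fst,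
        ((PySem.Dict.mk (hd :: tl)).get? d).getD 0 = ((PySem.Dict.mk tl).get? d).getD 0 := by
      intro d hd_mem
      have hne : hd.1 ≠ d := fun he => hnd.1 (he ▸ hd_mem)
      rw [PySem.Dict.get?_mk_cons]
      simp [hne]
    have hhd : ((PySem.Dict.mk (hd :: tl)).get? hd.1).getD 0 = hd.2 := by
      rw [PySem.Dict.get?_mk_cons]; simp
    simp only [List.map_cons, List.filter_cons, hhd]
    rw [List.filter_congr (fun d hd_mem => by rw [hlook d hd_mem])]
    rw [ih hnd.2]
    by_cases h : P hd.2 <;> simp [h]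

-- the early-exiting flag scan computes the two 'any's
theorem pv_hasBoth_eq (st : List (String × Int)) : ∀ (hp hz : Bool),
    pvHasBoth st hp hz
      = ((hp || st.any fun p => decide (0 < p.2)) && (hz || st.any fun p => decide (p.2 = 0))) := by
  induction st with
  | nil => intro hp hz; simp [pvHasBoth]
  | cons hd tl ih =>
    intro hp hz
    rw [pvHasBoth]
    simp only [List.any_cons]
    by_cases h : ((hp || decide (0 < hd.2)) && (hz || decide (hd.2 = 0))) = true
    · rw [if_pos h]
      rcases Bool.and_eq_true_iff.mp h with ⟨h1, h2⟩
      rcases Bool.or_eq_true_iff.mp h1 with h1 | h1 <;>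
        rcases Bool.or_eq_true_iff.mp h2 with h2 | h2 <;> simp [h1, h2]
    · rw [if_neg h, ih]
      simp [Bool.or_assoc]

-- per-pair: A's condition equals B's condition
theorem pv_cond_eq (ps : List (String × List (String × Int)))
    (hnd : (ps.map Prod.fst).Nodup) (p : String × List (String × Int)) (hp : p ∈ ps)
    (hnd2 : (p.2.map Prod.fst).Nodup) :
    (decide (((((PySem.Dict.mk ps).get? p.1).getD []).map Prod.fst).filter
        (fun doc => decide (0 < ((PySem.Dict.mk (((PySem.Dict.mk ps).get? p.1).getD [])).get? doc).getD 0)) ≠ [] ∧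
      ((((PySem.Dict.mk ps).get? p.1).getD []).map Prod.fst).filter
        (fun doc => decide (((PySem.Dict.mk (((PySem.Dict.mk ps).get? p.1).getD [])).get? doc).getD 0 = 0)) ≠ []))
      = pvHasBoth p.2 false false := by
  have hst : ((PySem.Dict.mk ps).get? p.1).getD [] = p.2 := by
    rw [pv_mk_get?_of_mem ps p.1 p.2 hnd hp]; rfl
  rw [hst]
  have h1 := pv_keyfilter (fun v => decide (0 < v)) p.2 hnd2
  have h2 := pv_keyfilter (fun v => decide (v = 0)) p.2 hnd2
  simp only at h1 h2
  rw [h1, h2, pv_hasBoth_eq]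
  simp only [Bool.false_or, Bool.decide_and]
  congr 1 <;> (rw [Bool.eq_iff_iff]; simp [List.filter_eq_nil_iff, List.any_eq_true])

-- ===== VERDICT (by name: the statement is the Claim_ definition above) =====
theorem get_needed_queries_spec : Claim_equal_get_needed_queries := by
  intro ps _hdom hpre
  unfold Spec_get_needed_queries get_needed_queries get_needed_queries_alt
  refine PySem.List.foldl_congr_mem _ _ _ _ ?_
  intro acc p hp
  have h := pv_cond_eq ps hpre.1 p hp (hpre.2 p hp)
  simp only [← h, decide_eq_true_eq]
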